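-- pv_equiv track=rewrite | github.com/NewtonGomez/ShapeMetrics-Interface | src/logic/decoding_functions.py | af8_to_f8
-- ===== SOURCE A (Python) =====
-- def af8_to_f8(af8_chain):
--     """
--     Convert AF8 (relative) chain to F8 (absolute) by testing initial directions.
--
--     Args:
--         af8_chain (list): Relative AF8 chain (0-7)
--
--     Returns:
--         list: Absolute F8 chain
--     """
--     moves = {0:(0,1), 1:(1,1), 2:(1,0), 3:(1,-1),
--             4:(0,-1), 5:(-1,-1), 6:(-1,0), 7:(-1,1)}
--
--     for initial_direction in range(8):
--         f8 = []
--         current_state = initial_direction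
--
--         for relative_symbol in af8_chain:
--             current_state = (current_state + relative_symbol) % 8
--             f8.append(current_state)
--
--         x, y = 0, 0
--         for direction in f8:
--             dx, dy = moves[direction]
--             x += dx
--             y += dy
--
--         if x == 0 and y == 0:
--             return f8
--
--     return f8
-- ===== SOURCE B (Python) =====
-- def af8_to_f8(af8_chain):
--     moves = [(0, 1), (1, 1), (1, 0), (1, -1),
--              (0, -1), (-1, -1), (-1, 0), (-1, 1)]
--
--     # prefix sums mod 8 (the chain for initial direction 0), computed once
--     p = []
--     s = 0
--     for a in af8_chain:
--         s = (s + a) % 8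
--         p.append(s)
--
--     # histogram of the prefix values
--     counts = {}
--     for v in p:
--         counts[v] = counts.get(v, 0) + 1
--
--     # displacement for every initial direction in O(64); first closing one wins
--     best = 7
--     for d in range(8):
--         x = sum(counts.get(r, 0) * moves[(d + r) % 8][0] for r in range(8))
--         y = sum(counts.get(r, 0) * moves[(d + r) % 8][1] for r in range(8))
--         if x == 0 and y == 0:
--             best = d
--             break
--
--     return [(best + v) % 8 for v in p]
-- ===== Notes on version B (the rewrite author's own statement) =====
-- stated objective: faster
-- what changed: A rebuilds the candidate chain and walks its displacement for each of the 8 initial directions (8 full rescans); B computes the prefix-sum chain once, histograms its residues, evaluates all 8 displacements from the 8-bucket histogram in O(64), and builds the winning chain once.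
import Mathlib
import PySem

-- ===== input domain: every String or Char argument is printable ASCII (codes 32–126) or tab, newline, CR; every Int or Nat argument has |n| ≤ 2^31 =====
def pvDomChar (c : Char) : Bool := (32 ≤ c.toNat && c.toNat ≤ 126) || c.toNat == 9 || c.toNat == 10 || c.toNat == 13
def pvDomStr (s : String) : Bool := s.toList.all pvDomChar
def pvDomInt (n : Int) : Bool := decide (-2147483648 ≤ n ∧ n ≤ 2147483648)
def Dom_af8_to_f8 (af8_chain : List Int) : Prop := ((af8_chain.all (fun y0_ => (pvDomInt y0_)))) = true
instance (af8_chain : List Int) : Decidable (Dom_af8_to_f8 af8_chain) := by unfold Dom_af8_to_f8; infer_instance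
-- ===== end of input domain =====

-- B replaces A's eight full rescans of the chain (one rebuild + one displacement
-- walk per candidate direction) by one prefix pass, a histogram, and an O(64)
-- displacement table; objective: faster (constant factor).

-- ===== PORT A =====
-- A's `moves` dict lookup `moves[direction]`: the key is always `… % 8` ∈ [0,8),
-- so the lookup never raises; ported as a total if-chain (exact on all reached keys).
def pvMovesA (d : Int) : Int × Int :=
  if d = 0 then (0, 1) else if d = 1 then (1, 1) else if d = 2 then (1, 0)
  else if d = 3 then (1, -1) else if d = 4 then (0, -1) else if d = 5 then (-1, -1)
  else if d = 6 then (-1, 0) else (-1, 1)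

-- inner loop: current_state / f8.append
def pvChainA (d : Int) (c : List Int) : List Int :=
  (c.foldl (fun (st : Int × List Int) a =>
      let cs := PySem.Int.mod (st.1 + a) 8
      (cs, st.2 ++ [cs])) (d, ([] : List Int))).2

-- x, y displacement loop
def pvDispA (f8 : List Int) : Int × Int :=
  f8.foldl (fun (xy : Int × Int) dir => (xy.1 + (pvMovesA dir).1, xy.2 + (pvMovesA dir).2)) (0, 0)

-- `for initial_direction in range(8): … if x == 0 and y == 0: return f8`; after
-- the loop the leftover variable f8 is returned
def pvGoA (c : List Int) : List Int → List Int → List Int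
  | [], f8 => f8
  | d :: rest, _ =>
      let f8 := pvChainA d c
      let xy := pvDispA f8
      if xy.1 = 0 ∧ xy.2 = 0 then f8 else pvGoA c rest f8

def af8_to_f8 (af8_chain : List Int) : List Int :=
  pvGoA af8_chain (PySem.List.pyRange 0 8 1) []

-- ===== PORT B =====
def pvMovesB : List (Int × Int) :=
  [(0, 1), (1, 1), (1, 0), (1, -1), (0, -1), (-1, -1), (-1, 0), (-1, 1)]

-- prefix pass: p, s
def pvPrefixB (c : List Int) : List Int :=
  (c.foldl (fun (st : Int × List Int) a =>
      let s := PySem.Int.mod (st.1 + a) 8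
      (s, st.2 ++ [s])) (0, ([] : List Int))).2

-- `moves[(d + r) % 8]`: the index is always in [0,8), never raises; default (0,0) unreached
def pvXB (counts : PySem.Dict Int Int) (d : Int) : Int :=
  ((PySem.List.pyRange 0 8 1).map (fun r =>
      counts.getD r 0 * (PySem.List.pyGetD pvMovesB (PySem.Int.mod (d + r) 8) (0, 0)).1)).sum

def pvYB (counts : PySem.Dict Int Int) (d : Int) : Int :=
  ((PySem.List.pyRange 0 8 1).map (fun r =>
      counts.getD r 0 * (PySem.List.pyGetD pvMovesB (PySem.Int.mod (d + r) 8) (0, 0)).2)).sum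

-- `best = 7; for d in range(8): … break`
def pvBestB (counts : PySem.Dict Int Int) : List Int → Int
  | [] => 7
  | d :: rest =>
      if pvXB counts d = 0 ∧ pvYB counts d = 0 then d else pvBestB counts rest

def af8_to_f8_alt (af8_chain : List Int) : List Int :=
  let p := pvPrefixB af8_chain
  let counts := p.foldl (fun d v => d.insert v (d.getD v 0 + 1)) PySem.Dict.empty
  let best := pvBestB counts (PySem.List.pyRange 0 8 1)
  p.map (fun v => PySem.Int.mod (best + v) 8)

-- ===== PRECONDITION & SPEC =====
def Spec_af8_to_f8 (af8_chain : List Int) (out : List Int) : Prop := out = af8_to_f8_alt af8_chain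
instance (af8_chain : List Int) (out : List Int) : Decidable (Spec_af8_to_f8 af8_chain out) := by unfold Spec_af8_to_f8; infer_instance

-- ===== CLAIM (what is proved, stated in full; the proofs are below) =====
def Claim_equal_af8_to_f8 : Prop := ∀ (af8_chain : List Int), Dom_af8_to_f8 af8_chain → Spec_af8_to_f8 af8_chain (af8_to_f8 af8_chain)


-- ===== LEMMAS AND PROOFS =====

-- the prefix chain as a structural recursion (proof-side view of both folds)
def cFrom (s : Int) : List Int → List Int
  | [] => []
  | a :: t => PySem.Int.mod (s + a) 8 :: cFrom (PySem.Int.mod (s + a) 8) t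

theorem foldA (c : List Int) : ∀ (s : Int) (acc : List Int),
    (c.foldl (fun (st : Int × List Int) a =>
      let cs := PySem.Int.mod (st.1 + a) 8
      (cs, st.2 ++ [cs])) (s, acc)).2 = acc ++ cFrom s c := by
  induction c with
  | nil => intro s acc; simp [cFrom]
  | cons a t ih =>
    intro s acc
    simp only [List.foldl, cFrom]
    rw [ih]
    simp

theorem chainA_eq (d : Int) (c : List Int) : pvChainA d c = cFrom d c := by
  have h := foldA c d []
  simpa [pvChainA] using h

theorem prefixB_eq (c : List Int) : pvPrefixB c = cFrom 0 c := by
  have h := foldA c 0 []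
  simpa [pvPrefixB] using h

theorem cFrom_shift (c : List Int) : ∀ (d s t : Int),
    PySem.Int.mod t 8 = PySem.Int.mod (d + s) 8 →
    cFrom t c = (cFrom s c).map (fun v => PySem.Int.mod (d + v) 8) := by
  induction c with
  | nil => intro _ _ _ _; simp [cFrom]
  | cons a w ih =>
    intro d s t h
    have h8 : (0:Int) < 8 := by norm_num
    have hh : PySem.Int.mod (t + a) 8 = PySem.Int.mod (d + PySem.Int.mod (s + a) 8) 8 := by
      simp only [PySem.Int.mod_eq_emod_of_pos h8] at *
      omega
    simp only [cFrom, List.map]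
    rw [hh, ih d (PySem.Int.mod (s + a) 8) _ (by
      simp only [PySem.Int.mod_eq_emod_of_pos h8]
      omega)]

theorem chainA_map (d : Int) (c : List Int) :
    pvChainA d c = (cFrom 0 c).map (fun v => PySem.Int.mod (d + v) 8) := by
  rw [chainA_eq]
  exact cFrom_shift c d 0 d (by norm_num)

theorem cFrom_mem (c : List Int) : ∀ (s : Int) (v : Int), v ∈ cFrom s c → 0 ≤ v ∧ v < 8 := by
  induction c with
  | nil => intro s v h; simp [cFrom] at h
  | cons a w ih =>
    intro s v h
    simp only [cFrom, List.mem_cons] at h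
    rcases h with h | h
    · subst h; exact ⟨PySem.Int.mod_nonneg _ (by norm_num), PySem.Int.mod_lt _ (by norm_num)⟩
    · exact ih _ _ h

theorem dispA_eq (l : List Int) :
    pvDispA l = ((l.map (fun v => (pvMovesA v).1)).sum, (l.map (fun v => (pvMovesA v).2)).sum) := by
  suffices h : ∀ (x y : Int),
      l.foldl (fun (xy : Int × Int) dir => (xy.1 + (pvMovesA dir).1, xy.2 + (pvMovesA dir).2)) (x, y)
        = (x + (l.map (fun v => (pvMovesA v).1)).sum, y + (l.map (fun v => (pvMovesA v).2)).sum) by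
    simpa [pvDispA] using h 0 0
  induction l with
  | nil => intro x y; simp
  | cons a t ih => intro x y; simp [List.foldl, ih]; constructor <;> ring

-- a sum over a list of mod-8 residues, read off its histogram
theorem sum_count (g : Int → Int) : ∀ (p : List Int), (∀ v ∈ p, 0 ≤ v ∧ v < 8) →
    (p.map g).sum =
      (([0,1,2,3,4,5,6,7] : List Int).map (fun r => (p.count r : Int) * g r)).sum := by
  intro p
  induction p with
  | nil => intro _; simp
  | cons a t ih =>
    intro h
    have ha := h a (by simp)
    have ht := fun v hv => h v (List.mem_cons_of_mem _ hv)
    simp only [List.map, List.sum_cons, ih ht]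
    obtain ⟨h0, h1⟩ := ha
    interval_cases a <;> simp <;> ring

theorem movesAB (i : Int) (h0 : 0 ≤ i) (h1 : i < 8) :
    PySem.List.pyGetD pvMovesB i (0, 0) = pvMovesA i := by
  interval_cases i <;> decide

theorem pyRange8 : PySem.List.pyRange 0 8 1 = [0, 1, 2, 3, 4, 5, 6, 7] := by decide

theorem condEqX (c : List Int) (d : Int) :
    pvXB (PySem.Dict.counter (cFrom 0 c)) d = (pvDispA (pvChainA d c)).1 := by
  rw [dispA_eq]
  simp only []
  rw [chainA_map, List.map_map]
  rw [sum_count ((fun v => (pvMovesA v).1) ∘ (fun v => PySem.Int.mod (d + v) 8)) _ (cFrom_mem c 0)]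
  simp only [pvXB, pyRange8, List.map, List.sum_cons, PySem.Dict.getD_counter, Function.comp,
    movesAB _ (PySem.Int.mod_nonneg _ (by norm_num)) (PySem.Int.mod_lt _ (by norm_num))]
theorem condEqY (c : List Int) (d : Int) :
    pvYB (PySem.Dict.counter (cFrom 0 c)) d = (pvDispA (pvChainA d c)).2 := by
  rw [dispA_eq]
  simp only []
  rw [chainA_map, List.map_map]
  rw [sum_count ((fun v => (pvMovesA v).2) ∘ (fun v => PySem.Int.mod (d + v) 8)) _ (cFrom_mem c 0)]
  simp only [pvYB, pyRange8, List.map, List.sum_cons, PySem.Dict.getD_counter, Function.comp,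
    movesAB _ (PySem.Int.mod_nonneg _ (by norm_num)) (PySem.Int.mod_lt _ (by norm_num))]


-- the direction search: A's early-return loop vs B's best-index search
theorem goA_eq (c : List Int) : ∀ (ds : List Int) (prev : List Int),
    (ds.getLast? = some 7 ∨
      (ds = [] ∧ prev = (cFrom 0 c).map (fun v => PySem.Int.mod (7 + v) 8))) →
    pvGoA c ds prev =
      (cFrom 0 c).map
        (fun v => PySem.Int.mod (pvBestB (PySem.Dict.counter (cFrom 0 c)) ds + v) 8) := by
  intro ds
  induction ds with
  | nil =>
    intro prev h
    rcases h with h | ⟨_, h⟩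
    · simp at h
    · simpa [pvGoA, pvBestB] using h
  | cons d rest ih =>
    intro prev h
    have hlast : (d :: rest).getLast? = some 7 := by
      rcases h with h | ⟨h, _⟩
      · exact h
      · simp at h
    simp only [pvGoA, pvBestB, ← condEqX c d, ← condEqY c d]
    split_ifs with hc
    · exact chainA_map d c
    · apply ih
      cases rest with
      | nil =>
        right
        refine ⟨rfl, ?_⟩
        have hd : d = 7 := by simpa using hlast
        rw [hd]; exact chainA_map 7 c
      | cons b l =>
        left
        simpa using hlast

-- ===== VERDICT (by name: the statement is the Claim_ definition above) =====
theorem af8_to_f8_spec : Claim_equal_af8_to_f8 := by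
  intro c _
  unfold Spec_af8_to_f8 af8_to_f8 af8_to_f8_alt
  simp only [prefixB_eq, PySem.Dict.foldl_insert_getD_add_one_eq_counter, pyRange8]
  exact goA_eq c [0, 1, 2, 3, 4, 5, 6, 7] [] (Or.inl (by simp))
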